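/- GENERATED by tools/from_farm_form.py from prooffarm-gif/accepted/GifMakeMapObject.1/Proof.lean (a worked proof of the farm's unit `GifMakeMapObject.1`,
   accepted by the verdict) — do not edit. -/
import Gif.Spec.Units.GifMakeMapObject_1
import Gif.Spec.Proved.GifMakeMapObject_1_Lemmas

open X86 X86.User Asan ProgX.Base ProgX.Base.Spec Gif.Spec

set_option maxRecDepth 4000
set_option maxHeartbeats 4000000

/-- Segment 1 of `GifMakeMapObject` (0x107900 … 0x10793b and 0x1079a7; gifalloc.c:42-56): six pushes, `GifBitSize(ColorCount)`, the
   test of l.48 (no power of two: `rbx = 0`, the join), `malloc(24)`: BOTH outcomes of `AllocPost`, decided by `H.Fits (r16 24)`: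
   room: `AfterMalloc` with the heap `H.push 24 (r16 24)`; no room (`FailPost`: only stack written): the join with the heap `H`. -/
theorem Gif.Spec.Proved.GifMakeMapObject_1_ok : Gif.Spec.GifMakeMapObject_1.Statement := by
  intro Lay hLay μ hμ u₀ hcode h_GifBitSize h_malloc H rest frames count e ret he hpre
  have he0 := he
  have hpre0 := hpre
  v_entry he
  obtain ⟨hp, hcount, hc256, hsrc⟩ := hpre
  have hm := h_malloc H rest frames
  have hbase := hp.base
  have hlimit := hp.limit
  have hroom := hp.inv.heap.room
  rw [hbase, hlimit] at hroom
  have hnx : 0x800040 ≤ H.next ∧ H.next ≤ 0xC00020 := by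
    rw [Heap.next_def, hbase]
    omega
  u_walk hcode [hμ.vendor] until [Gif.L.GifMakeMapObject.ret1] span [ProgX.Base.L.textLo, ProgX.Base.L.textHi] side (v_side)
  case call_inv =>
    v_inv
  case pre_107913 =>
    exact True.intro
  -- 0x107918 (ret1): GifBitSize has returned; it wrote nothing
  obtain ⟨hbs_mem, hbs_lo, hbs_hi⟩ := w_post
  v_after_call w_rsp_107913 w_mem_107913
  have w_mem := hbs_mem
  rw [w_mem_107913] at w_mem
  obtain ⟨z, w_rax⟩ : ∃ z, s_107913r.reg .rax = z := ⟨_, rfl⟩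
  rw [w_rax] at hbs_lo hbs_hi
  clear w_same
  u_walk hcode [hμ.vendor] until [Gif.L.GifMakeMapObject.ret2, Gif.L.GifMakeMapObject.at_1079ac] span [ProgX.Base.L.textLo, ProgX.Base.L.textHi] side (v_side)
  case call_inv =>
    v_inv
  case pre_10792e =>
    -- malloc's precondition: the heap's common precondition under the lower stack pointer (only stack was stored to)
    have hun : ShadowUntouched e.mem s_10792e.mem := by v_untouched
    have hsame : Mem.EqOn H.base H.limit e.mem s_10792e.mem := by
      rw [hbase, hlimit, w_mem]
      u_eqon
    refine hp.callee hun hsame ?_ ?_ ?_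
    · rw [w_rsp]
      u_omega
    · rw [w_rsp]
      u_omega
    · rw [w_rsp]
      u_omega
  case cont =>
    -- l.48/49: no power of two: `mov ebx, 0`, at the join with the heap as it was
    have hun : ShadowUntouched e.mem s_1079a7.mem := by v_untouched
    have hsame : Mem.EqOn H.base H.limit e.mem s_1079a7.mem := by
      rw [hbase, hlimit, w_mem]
      u_eqon
    have hinv : HeapInv H rest frames ((e.reg .rsp).toNat - 56) s_1079a7.mem :=
      (hp.inv.eqOn hun hsame).lower (by omega) (by omega) (by omega)
    refine ReachVia.done (Or.inr ⟨he0, hpre0, w_rip, w_rsp, ?_, ?_, ?_, ?_, ?_, ?_, ?_, Heap.Grew.refl H, hinv, Or.inl ?_, ?_, conv_code_in w_eq, ?_⟩)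
    · u_resolve
    · u_resolve
    · u_resolve
    · u_resolve
    · u_resolve
    · u_resolve
    · -- the return address: the pushes lie below its slot
      rw [w_mem]
      u_frame he_retAddr
    · rw [w_rbx]
      rfl
    · simp only [shadowSpan]
      rw [w_mem]
      u_same
    · v_inv
  -- 0x107933 (ret2): malloc has returned
  have e24 : (s_10792e.reg .rdi).toNat = 24 := by
    rw [w_rdi_10792e]
    rfl
  have hpost : AllocPost H rest frames 32 (s_10792e.reg .rdi).toNat (r16 (s_10792e.reg .rdi).toNat) s_10792e s_10792er :=
    w_post
  rw [e24] at hpost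
  clear w_post
  have e8 : (s_10792e.reg .rsp).toNat + 8 = (e.reg .rsp).toNat - 56 := by
    rw [w_rsp_10792e]
    u_omega
  have htwo : 2 ≤ count := by
    have h2 := Gif.Spec.GifMakeMapObject_1.mm1_shift_ge_two z hbs_lo hbs_hi
    rw [hbr_107927, toNat_part32, hcount] at h2
    exact h2
  have hrbp : (s_10792er.reg .rbp).toNat = count := by
    rw [w_rbp, toNat_ofBV32, toNat_part32]
    exact hcount
  have hr12 : (s_10792er.reg .r12).toNat ≤ 9 := by
    rw [w_r12, toNat_ofBV32, toNat_part32]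
    omega
  v_after_call w_rsp_10792e w_mem_10792e
  simp only [shadowSpan, e24] at w_same
  -- the six saved registers, through malloc's footprint
  have hp15 : s_10792e.mem.readLE (e.reg .rsp - 8) 8 = (e.reg .r15).toNat := by u_resolve
  rw [w_mem_10792e] at hp15
  have hs15 : s_10792er.mem.readLE (e.reg .rsp - 8) 8 = (e.reg .r15).toNat := by u_frame hp15
  have hp14 : s_10792e.mem.readLE (e.reg .rsp - 16) 8 = (e.reg .r14).toNat := by u_resolve
  rw [w_mem_10792e] at hp14
  have hs14 : s_10792er.mem.readLE (e.reg .rsp - 16) 8 = (e.reg .r14).toNat := by u_frame hp14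
  have hp13 : s_10792e.mem.readLE (e.reg .rsp - 24) 8 = (e.reg .r13).toNat := by u_resolve
  rw [w_mem_10792e] at hp13
  have hs13 : s_10792er.mem.readLE (e.reg .rsp - 24) 8 = (e.reg .r13).toNat := by u_frame hp13
  have hp12 : s_10792e.mem.readLE (e.reg .rsp - 32) 8 = (e.reg .r12).toNat := by u_resolve
  rw [w_mem_10792e] at hp12
  have hs12 : s_10792er.mem.readLE (e.reg .rsp - 32) 8 = (e.reg .r12).toNat := by u_frame hp12
  have hpbp : s_10792e.mem.readLE (e.reg .rsp - 40) 8 = (e.reg .rbp).toNat := by u_resolve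
  rw [w_mem_10792e] at hpbp
  have hsbp : s_10792er.mem.readLE (e.reg .rsp - 40) 8 = (e.reg .rbp).toNat := by u_frame hpbp
  have hpbx : s_10792e.mem.readLE (e.reg .rsp - 48) 8 = (e.reg .rbx).toNat := by u_resolve
  rw [w_mem_10792e] at hpbx
  have hsbx : s_10792er.mem.readLE (e.reg .rsp - 48) 8 = (e.reg .rbx).toNat := by u_frame hpbx
  -- the return address, over the pushes and through malloc's footprint
  have hpra : UInt64.ofNat (s_10792e.mem.readLE (e.reg .rsp) 8) = ret := by
    rw [w_mem_10792e]
    u_frame he_retAddr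
  rw [w_mem_10792e] at hpra
  have hsra : UInt64.ofNat (s_10792er.mem.readLE (e.reg .rsp) 8) = ret := by u_frame hpra
  obtain ⟨p, w_rax⟩ : ∃ p, s_10792er.reg .rax = p := ⟨_, rfl⟩
  by_cases hfit : H.Fits (r16 24)
  · -- ROOM: `rax = H.next ≠ 0`, the heap has the new object
    obtain ⟨hpn, hinv⟩ := hpost.1 hfit
    rw [w_rax] at hpn
    rw [e8] at hinv
    have hfit' := hfit
    unfold Heap.Fits at hfit'
    rw [hbase, hlimit] at hfit'
    have hnx2 : H.next + 32 + 32 ≤ 0xC00000 := by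
      rw [Heap.next_def, hbase]
      have e32 : r16 24 = 32 := by decide
      omega
    u_walk hcode [hμ.vendor] until [Gif.L.GifMakeMapObject.at_10793b, Gif.L.GifMakeMapObject.at_1079ac] span [ProgX.Base.L.textLo, ProgX.Base.L.textHi] side (v_side)
    -- 0x10793b (cut 1): `rbx = Object`
    refine ReachVia.done (Or.inl ⟨he0, hpre0, w_rip, w_rsp, ?_, ?_, ?_, w_r13, ?_, ?_, ?_, ?_, ?_, ?_, ?_, htwo, ?_, ?_, conv_code_in w_eq, ?_⟩)
    · rw [w_rbx]
      exact hpn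
    · rw [w_rbp, toNat_ofBV32, toNat_part32]
      exact hcount
    · rw [w_r12, toNat_ofBV32, toNat_part32]
      omega
    · rw [w_mem]
      exact hs15
    · rw [w_mem]
      exact hs14
    · rw [w_mem]
      exact hs13
    · rw [w_mem]
      exact hs12
    · rw [w_mem]
      exact hsbp
    · rw [w_mem]
      exact hsbx
    · rw [w_mem]
      exact hsra
    · rw [w_mem]
      exact hinv
    · simp only [shadowSpan]
      rw [w_mem]
      u_same
    · v_inv
  · -- NO ROOM: `rax = 0`, the heap as it was; nothing but stack written
    obtain ⟨hp0, hinv, hunc, hstack⟩ := hpost.2 hfit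
    rw [w_rax] at hp0
    rw [e8] at hinv
    rw [hp0] at w_rax
    clear w_same
    have w_same := hstack
    rw [w_rsp_10792e, w_mem_10792e] at w_same
    u_walk hcode [hμ.vendor] until [Gif.L.GifMakeMapObject.at_10793b, Gif.L.GifMakeMapObject.at_1079ac] span [ProgX.Base.L.textLo, ProgX.Base.L.textHi] side (v_side)
    -- 0x1079ac (cut 2): `rbx = 0`, the heap as it was
    refine ReachVia.done (Or.inr ⟨he0, hpre0, w_rip, w_rsp, ?_, ?_, ?_, ?_, ?_, ?_, ?_, Heap.Grew.refl H, ?_, Or.inl ?_, ?_, conv_code_in w_eq, ?_⟩)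
    · rw [w_mem]
      exact hs15
    · rw [w_mem]
      exact hs14
    · rw [w_mem]
      exact hs13
    · rw [w_mem]
      exact hs12
    · rw [w_mem]
      exact hsbp
    · rw [w_mem]
      exact hsbx
    · rw [w_mem]
      exact hsra
    · rw [w_mem]
      exact hinv
    · rw [w_rbx]
      rfl
    · simp only [shadowSpan]
      rw [w_mem]
      u_same
    · v_inv
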